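-- pv_equiv track=rewrite | github.com/ecommisso/Clock-Game | players/team_3.py | getOtherCards
-- ===== SOURCE A (Python) =====
-- def getOtherCards(cards, state):
--     letters = ['A', 'B', 'C', 'D', 'E', 'F', 'G', 'H', 'I', 'J', 'K', 'L', 'M', 'N', 'O', 'P', 'Q', 'R', 'S', 'T', 'U', 'V', 'W', 'X']
--     for i in cards:
--         if i in letters:
--             letters.remove(i)
--     for i in state:
--         if i in letters:
--             letters.remove(i)
--     return letters
-- ===== SOURCE B (Python) =====
-- def getOtherCards(cards, state):
--     used = set(cards) | set(state)
--     return [c for c in ['A', 'B', 'C', 'D', 'E', 'F', 'G', 'H', 'I', 'J', 'K', 'L',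
--                         'M', 'N', 'O', 'P', 'Q', 'R', 'S', 'T', 'U', 'V', 'W', 'X']
--             if c not in used]
-- ===== Notes on version B (the rewrite author's own statement) =====
-- stated objective: idiomatic
-- what changed: B builds one set of used strings from cards and state and filters the fixed 24-letter alphabet by membership, instead of A's repeated 'in'-test plus list.remove scans of the shrinking letters list per input element.
import Mathlib
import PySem

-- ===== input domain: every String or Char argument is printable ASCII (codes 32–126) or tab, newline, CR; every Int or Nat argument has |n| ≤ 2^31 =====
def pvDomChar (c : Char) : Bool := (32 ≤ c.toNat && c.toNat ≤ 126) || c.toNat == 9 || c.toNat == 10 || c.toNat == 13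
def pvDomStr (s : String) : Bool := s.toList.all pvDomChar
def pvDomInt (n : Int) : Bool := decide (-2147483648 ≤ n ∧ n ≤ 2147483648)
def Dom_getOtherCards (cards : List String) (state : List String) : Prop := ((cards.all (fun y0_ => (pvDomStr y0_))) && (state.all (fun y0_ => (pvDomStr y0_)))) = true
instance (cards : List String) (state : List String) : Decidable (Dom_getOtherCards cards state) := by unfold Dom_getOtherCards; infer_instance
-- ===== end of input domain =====

-- B builds one set of used strings and filters the fixed alphabet, instead of A's per-element
-- membership test plus list.remove on the shrinking letters list (objective: idiomatic).

-- ===== PORT A =====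
-- the fixed 24-letter list from A
def pvLetters : List String :=
  ["A", "B", "C", "D", "E", "F", "G", "H", "I", "J", "K", "L",
   "M", "N", "O", "P", "Q", "R", "S", "T", "U", "V", "W", "X"]

-- 'if i in letters: letters.remove(i)' — remove first occurrence when present
def pvRemoveStep (ls : List String) (i : String) : List String :=
  if ls.contains i then ls.erase i else ls

def getOtherCards (cards : List String) (state : List String) : List String :=
  let letters1 := cards.foldl pvRemoveStep pvLetters
  state.foldl pvRemoveStep letters1

-- ===== PORT B =====
def getOtherCards_alt (cards : List String) (state : List String) : List String :=
  let used := PySem.Set.union (PySem.Set.ofList cards) (PySem.Set.ofList state)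
  pvLetters.filter (fun c => !(PySem.Set.contains used c))

-- ===== PRECONDITION & SPEC =====
def Spec_getOtherCards (cards : List String) (state : List String) (out : List String) : Prop := out = getOtherCards_alt cards state
instance (cards : List String) (state : List String) (out : List String) : Decidable (Spec_getOtherCards cards state out) := by unfold Spec_getOtherCards; infer_instance

-- ===== CLAIM (what is proved, stated in full; the proofs are below) =====
def Claim_equal_getOtherCards : Prop := ∀ (cards : List String) (state : List String), Dom_getOtherCards cards state → Spec_getOtherCards cards state (getOtherCards cards state)

-- ===== LEMMAS AND PROOFS =====

theorem pvRemoveStep_eq_erase (ls : List String) (i : String) : pvRemoveStep ls i = ls.erase i := by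
  unfold pvRemoveStep
  split_ifs with h
  · rfl
  · exact (List.erase_of_not_mem (by simpa using h)).symm

theorem foldl_remove_eq_filter (xs : List String) :
    ∀ (L : List String), L.Nodup →
      xs.foldl pvRemoveStep L = L.filter (fun c => decide (c ∉ xs)) := by
  induction xs with
  | nil => intro L _; simp
  | cons x xs ih =>
    intro L hL
    have h1 : (x :: xs).foldl pvRemoveStep L = xs.foldl pvRemoveStep (L.erase x) := by
      simp [List.foldl_cons, pvRemoveStep_eq_erase]
    rw [h1, ih (L.erase x) (hL.erase x)]
    rw [hL.erase_eq_filter x, List.filter_filter]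
    apply List.filter_congr
    intro c _
    by_cases hcx : c = x <;> by_cases hcxs : c ∈ xs <;> simp [hcx, hcxs]

theorem getOtherCards_spec' (cards state : List String) :
    getOtherCards cards state = getOtherCards_alt cards state := by
  have hnd : pvLetters.Nodup := by decide
  show state.foldl pvRemoveStep (cards.foldl pvRemoveStep pvLetters) = _
  rw [foldl_remove_eq_filter cards pvLetters hnd,
      foldl_remove_eq_filter state _ (hnd.filter _),
      List.filter_filter]
  unfold getOtherCards_alt
  apply List.filter_congr
  intro c _
  have : PySem.Set.contains (PySem.Set.union (PySem.Set.ofList cards) (PySem.Set.ofList state)) c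
      = decide (c ∈ cards ∨ c ∈ state) := by
    by_cases hm : c ∈ cards ∨ c ∈ state
    · have h : PySem.Set.contains (PySem.Set.union (PySem.Set.ofList cards) (PySem.Set.ofList state)) c = true :=
        (PySem.Set.contains_iff _ _).mpr (by rw [PySem.Set.mem_union]; simpa [PySem.Set.mem_ofList] using hm)
      simp [h]
    · have h : ¬ (PySem.Set.contains (PySem.Set.union (PySem.Set.ofList cards) (PySem.Set.ofList state)) c = true) := by
        rw [PySem.Set.contains_iff, PySem.Set.mem_union]
        simpa [PySem.Set.mem_ofList] using hm
      simp [Bool.eq_false_iff.mpr h]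
  rw [this]
  by_cases h1 : c ∈ cards <;> by_cases h2 : c ∈ state <;> simp [h1, h2]

-- ===== VERDICT (by name: the statement is the Claim_ definition above) =====
theorem getOtherCards_spec : Claim_equal_getOtherCards := by
  intro cards state _
  unfold Spec_getOtherCards
  exact getOtherCards_spec' cards state
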